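-- pv_equiv track=rewrite | github.com/lenarother/advent-of-code | adventofcode_2017/day_21/solution.py | parse_enhancement_rules
-- ===== SOURCE A (Python) =====
-- def get_pattern_variants(p):
--     """Rotate and flip pattern."""
--     p = p.replace('/', '')
--     variants = {p}
--     if len(p) == 9:
--         variants.add(p[2::3] + p[1::3] + p[::3])
--         variants.add(p[::3] + p[1::3] + p[2::3])
--         variants.add(p[:3][::-1] + p[3:6][::-1] + p[6:][::-1])
--     elif len(p) == 4:
--         variants.add(p[1::2] + p[::2])
--         variants.add(p[::2] + p[1::2])
--         variants.add(p[:2][::-1] + p[2:][::-1])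
--     reversed_variants = {i[::-1] for i in variants}
--     variants |= reversed_variants
--     return variants
--
-- def parse_enhancement_rules(data):
--     substitution_dict = {}
--     for line in data.strip().split('\n'):
--         input_pattern, output_pattern = line.split(' => ')
--         output_pattern = output_pattern.replace('/', '')
--         for pattern in get_pattern_variants(input_pattern):
--             substitution_dict[pattern] = output_pattern
--     return substitution_dict
-- ===== SOURCE B (Python) =====
-- def _flat(g):
--     return ''.join(''.join(r) for r in g)
--
-- def _transpose(g):
--     return [[r[i] for r in g] for i in range(len(g))]
--
-- def _rot_ccw(g):
--     return _transpose(g)[::-1]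
--
-- def _hmirror(g):
--     return [r[::-1] for r in g]
--
-- def _rot180(g):
--     return [r[::-1] for r in g][::-1]
--
-- def _variants(p):
--     p = p.replace('/', '')
--     if len(p) == 9:
--         n = 3
--     elif len(p) == 4:
--         n = 2
--     else:
--         return list(dict.fromkeys([p, p[::-1]]))
--     g = [list(p[i * n:(i + 1) * n]) for i in range(n)]
--     grids = [g, _rot_ccw(g), _transpose(g), _hmirror(g)]
--     flats = [_flat(x) for x in grids] + [_flat(_rot180(x)) for x in grids]
--     return list(dict.fromkeys(flats))
--
-- def parse_enhancement_rules(data):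
--     rules = {}
--     for line in data.strip().split('\n'):
--         input_pattern, output_pattern = line.split(' => ')
--         value = output_pattern.replace('/', '')
--         for v in _variants(input_pattern):
--             rules[v] = value
--     return rules
-- ===== Notes on version B (the rewrite author's own statement) =====
-- stated objective: alternative
-- what changed: get_pattern_variants' hand-coded string-slice variants are replaced by parsing the pattern into a 2D grid and generating the 8 dihedral variants with geometric transforms (transpose, rotate-90, mirror, rotate-180) before flattening and deduplicating; the rule-parsing loop populates the dict from this ordered variant list.
import Mathlib
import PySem

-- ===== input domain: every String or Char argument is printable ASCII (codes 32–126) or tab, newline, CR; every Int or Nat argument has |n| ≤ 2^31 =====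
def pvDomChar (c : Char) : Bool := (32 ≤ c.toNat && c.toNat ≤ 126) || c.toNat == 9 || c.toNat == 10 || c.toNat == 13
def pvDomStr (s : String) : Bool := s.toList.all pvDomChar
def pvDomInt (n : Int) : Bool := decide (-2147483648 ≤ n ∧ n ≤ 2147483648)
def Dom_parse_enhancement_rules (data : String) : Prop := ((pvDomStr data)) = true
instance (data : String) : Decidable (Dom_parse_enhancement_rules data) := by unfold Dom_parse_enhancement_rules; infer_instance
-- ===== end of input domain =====

-- B replaces A's hand-written slice arithmetic in get_pattern_variants by 2D grid transforms
-- (chunk into rows, transpose / rotate / mirror, flatten); same cost, clearer geometry ('alternative').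


-- ===== PORT A =====
-- s[a:b:step] for step ≠ 0 (never raises); exact: slice? is none only when step = 0
def pvSliceStep (s : String) (a b : Option Int) (st : Int) : String :=
  (PySem.Str.slice? s a b st).getD ""

-- s[::-1]
def pvRev (s : String) : String := pvSliceStep s none none (-1)

def get_pattern_variants (p0 : String) : PySem.Set String :=
  let p := PySem.Str.replace p0 "/" ""
  let variants : PySem.Set String := PySem.Set.add PySem.Set.empty p
  let variants :=
    if PySem.Str.len p = 9 then
      let v := PySem.Set.add variants
        (pvSliceStep p (some 2) none 3 ++ pvSliceStep p (some 1) none 3 ++ pvSliceStep p none none 3)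
      let v := PySem.Set.add v
        (pvSliceStep p none none 3 ++ pvSliceStep p (some 1) none 3 ++ pvSliceStep p (some 2) none 3)
      PySem.Set.add v
        (pvRev (PySem.Str.slice p none (some 3)) ++ pvRev (PySem.Str.slice p (some 3) (some 6)) ++ pvRev (PySem.Str.slice p (some 6) none))
    else if PySem.Str.len p = 4 then
      let v := PySem.Set.add variants (pvSliceStep p (some 1) none 2 ++ pvSliceStep p none none 2)
      let v := PySem.Set.add v (pvSliceStep p none none 2 ++ pvSliceStep p (some 1) none 2)
      PySem.Set.add v (pvRev (PySem.Str.slice p none (some 2)) ++ pvRev (PySem.Str.slice p (some 2) none))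
    else variants
  let reversed_variants : PySem.Set String := PySem.Set.ofList (variants.map pvRev)
  PySem.Set.union variants reversed_variants

def parse_enhancement_rules (data : String) : List (String × String) :=
  let lines := (PySem.Str.split? (PySem.Str.strip data) "\n").getD []
  (lines.foldl (fun d line =>
      match PySem.Str.split? line " => " with
      | some [input_pattern, output_pattern] =>
          let outv := PySem.Str.replace output_pattern "/" ""
          (get_pattern_variants input_pattern).foldl (fun d pat => PySem.Dict.insert d pat outv) d
      | _ => d
    ) (PySem.Dict.empty : PySem.Dict String String)).items

-- ===== PORT B ===== (grid transforms: transpose / rotate / mirror instead of string slicing)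
-- s[::-1] (B side; exact: slice? with step -1 never raises)
def pvRevAlt (s : String) : String := (PySem.Str.slice? s none none (-1)).getD ""

def pvFlat (g : List (List Char)) : String := String.ofList g.flatten

def pvTranspose (g : List (List Char)) : List (List Char) :=
  (PySem.List.pyRange 0 (PySem.List.len g) 1).map (fun i => g.map (fun r => PySem.List.pyGetD r i ' '))

def pvRotCCW (g : List (List Char)) : List (List Char) := (pvTranspose g).reverse

def pvHMirror (g : List (List Char)) : List (List Char) := g.map List.reverse

def pvRot180 (g : List (List Char)) : List (List Char) := (g.map List.reverse).reverse

def pvDihedral (p : String) (n : Int) : List String :=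
  let g := (PySem.List.pyRange 0 n 1).map
    (fun i => (PySem.Str.slice p (some (i * n)) (some ((i + 1) * n))).toList)
  let grids := [g, pvRotCCW g, pvTranspose g, pvHMirror g]
  PySem.List.dedup (grids.map pvFlat ++ grids.map (fun x => pvFlat (pvRot180 x)))

def pvVariants (p0 : String) : List String :=
  let p := PySem.Str.replace p0 "/" ""
  if PySem.Str.len p = 9 then pvDihedral p 3
  else if PySem.Str.len p = 4 then pvDihedral p 2
  else PySem.List.dedup [p, pvRevAlt p]

def pvApplyLine (d : PySem.Dict String String) (line : String) : PySem.Dict String String :=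
  -- line.split(' => ') (split? is none only for an empty separator, so getD is exact);
  -- the two-element unpacking is rendered arithmetically: exactly two parts, parts[0] and parts[1]
  let parts := (PySem.Str.split? line " => ").getD []
  if parts.length = 2 then
    let outv := PySem.Str.replace (PySem.List.pyGetD parts 1 "") "/" ""
    (pvVariants (PySem.List.pyGetD parts 0 "")).foldl (fun d pat => PySem.Dict.insert d pat outv) d
  else d

def parse_enhancement_rules_alt (data : String) : List (String × String) :=
  let lines := (PySem.Str.split? (PySem.Str.strip data) "\n").getD []
  (lines.foldl pvApplyLine (PySem.Dict.empty : PySem.Dict String String)).items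


-- ===== PRECONDITION & SPEC =====
-- Pre_ excludes exactly the inputs on which Python A raises ValueError: a line of
-- data.strip().split('\n') whose number of ' => ' separators is not exactly 1
-- (line.split(' => ') then does not unpack into two variables).
def Pre_parse_enhancement_rules (data : String) : Prop :=
  ∀ line ∈ (PySem.Str.split? (PySem.Str.strip data) "\n").getD [],
    PySem.Str.count line " => " = 1
instance (data : String) : Decidable (Pre_parse_enhancement_rules data) := by
  unfold Pre_parse_enhancement_rules; infer_instance

def pvWitness_parse_enhancement_rules : String := "../.# => ##./#../...\n.#./..#/### => #..#/..../..../#..#"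

def Spec_parse_enhancement_rules (data : String) (out : List (String × String)) : Prop := out = parse_enhancement_rules_alt data
instance (data : String) (out : List (String × String)) : Decidable (Spec_parse_enhancement_rules data out) := by unfold Spec_parse_enhancement_rules; infer_instance

-- ===== CLAIM (what is proved, stated in full; the proofs are below) =====
def Claim_equal_parse_enhancement_rules : Prop := ∀ (data : String), Dom_parse_enhancement_rules data → Pre_parse_enhancement_rules data → Spec_parse_enhancement_rules data (parse_enhancement_rules data)

-- ===== LEMMAS AND PROOFS =====

theorem pv_add_of_mem {α : Type} [BEq α] [LawfulBEq α] (s : PySem.Set α) (x : α) (h : x ∈ s) :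
    PySem.Set.add s x = s := by
  simp [PySem.Set.add, PySem.Set.contains, h]

theorem pv_update_foldl_map {α : Type} [BEq α] [LawfulBEq α] (f : α → α) :
    ∀ (l t : List α) (s : PySem.Set α),
      PySem.Set.update s ((List.foldl PySem.Set.add t l).map f)
        = PySem.Set.update s ((t ++ l).map f) := by
  intro l
  induction l with
  | nil => intro t s; simp
  | cons x l ih =>
    intro t s
    have h1 : List.foldl PySem.Set.add t (x :: l) = List.foldl PySem.Set.add (PySem.Set.add t x) l := rfl
    rw [h1, ih]
    by_cases hx : x ∈ t
    · rw [pv_add_of_mem t x hx]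
      have hmem : f x ∈ PySem.Set.update s (t.map f) :=
        (PySem.Set.mem_update s (t.map f) (f x)).mpr (Or.inr (List.mem_map_of_mem hx))
      show PySem.Set.update s ((t ++ l).map f) = PySem.Set.update s ((t ++ x :: l).map f)
      simp only [List.map_append, List.map_cons, PySem.Set.update, List.foldl_append, List.foldl_cons]
      rw [show ((List.foldl PySem.Set.add s (List.map f t)).add (f x))
            = List.foldl PySem.Set.add s (List.map f t) from pv_add_of_mem _ _ hmem]
    · have : PySem.Set.add t x = t ++ [x] := by
        simp only [PySem.Set.add, PySem.Set.contains]
        rw [if_neg]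
        simp [hx]
      rw [this]
      simp

theorem pv_update_ofList_map {α : Type} [BEq α] [LawfulBEq α] (s : PySem.Set α) (c : List α) (f : α → α) :
    PySem.Set.update s ((PySem.Set.ofList c).map f) = PySem.Set.update s (c.map f) := by
  have := pv_update_foldl_map f c [] s
  simpa [PySem.Set.ofList] using this

theorem pv_update_ofList {α : Type} [BEq α] [LawfulBEq α] (s : PySem.Set α) (l : List α) :
    PySem.Set.update s (PySem.Set.ofList l) = PySem.Set.update s l := by
  have := pv_update_ofList_map s l id
  simpa using this

theorem pv_union_shape {α : Type} [BEq α] [LawfulBEq α] (c : List α) (f : α → α) :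
    PySem.Set.union (PySem.Set.ofList c) (PySem.Set.ofList ((PySem.Set.ofList c).map f))
      = PySem.List.dedup (c ++ c.map f) := by
  rw [show (PySem.Set.union (PySem.Set.ofList c) (PySem.Set.ofList ((PySem.Set.ofList c).map f)))
      = PySem.Set.update (PySem.Set.ofList c) (PySem.Set.ofList ((PySem.Set.ofList c).map f)) from rfl]
  rw [pv_update_ofList, pv_update_ofList_map]
  rw [PySem.List.dedup_eq_ofList]
  simp [PySem.Set.update, PySem.Set.ofList, List.foldl_append]


theorem pv_len4 {α : Type} (l : List α) (h : l.length = 4) :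
    ∃ a b c d, l = [a, b, c, d] := by
  match l, h with
  | [a, b, c, d], _ => exact ⟨a, b, c, d, rfl⟩
  | [], h => simp at h
  | [_], h => simp at h
  | [_, _], h => simp at h
  | [_, _, _], h => simp at h
  | _ :: _ :: _ :: _ :: _ :: _, h => simp at h

theorem pv_len9 {α : Type} (l : List α) (h : l.length = 9) :
    ∃ a b c d e f g h' i, l = [a, b, c, d, e, f, g, h', i] := by
  match l, h with
  | [a, b, c, d, e, f, g, h', i], _ => exact ⟨a, b, c, d, e, f, g, h', i, rfl⟩
  | [], h => simp at h
  | [_], h => simp at h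
  | [_, _], h => simp at h
  | [_, _, _], h => simp at h
  | [_, _, _, _], h => simp at h
  | [_, _, _, _, _], h => simp at h
  | [_, _, _, _, _, _], h => simp at h
  | [_, _, _, _, _, _, _], h => simp at h
  | [_, _, _, _, _, _, _, _], h => simp at h
  | _ :: _ :: _ :: _ :: _ :: _ :: _ :: _ :: _ :: _ :: _, h => simp at h

theorem pv_map_toList_inj (l1 l2 : List String)
    (h : l1.map String.toList = l2.map String.toList) : l1 = l2 := by
  have hinj : Function.Injective String.toList := fun _ _ hx => String.toList_inj.mp hx
  exact List.map_injective_iff.mpr hinj h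

-- `adds`-shaped restatements of pv_union_shape (definitionally equal; lets `rw` match the port's term)
theorem pv_union_shape1 {α : Type} [BEq α] [LawfulBEq α] (x1 : α) (f : α → α) :
    PySem.Set.union (PySem.Set.add PySem.Set.empty x1)
      (PySem.Set.ofList ((PySem.Set.add PySem.Set.empty x1).map f))
      = PySem.List.dedup ([x1] ++ [x1].map f) := pv_union_shape [x1] f

theorem pv_union_shape4 {α : Type} [BEq α] [LawfulBEq α] (x1 x2 x3 x4 : α) (f : α → α) :
    PySem.Set.union ((((PySem.Set.empty.add x1).add x2).add x3).add x4)
      (PySem.Set.ofList (((((PySem.Set.empty.add x1).add x2).add x3).add x4).map f))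
      = PySem.List.dedup ([x1, x2, x3, x4] ++ [x1, x2, x3, x4].map f) := pv_union_shape [x1, x2, x3, x4] f

-- the two variant generators agree on every pattern
theorem pv_variants_eq (p0 : String) : get_pattern_variants p0 = pvVariants p0 := by
  unfold get_pattern_variants pvVariants
  generalize PySem.Str.replace p0 "/" "" = q
  by_cases h9 : PySem.Str.len q = 9
  · simp only [if_pos h9]
    have hl : q.toList.length = 9 := by
      have := PySem.Str.len_eq q
      rw [h9] at this; exact_mod_cast this.symm
    obtain ⟨a, b, c, d, e, f, g, h', i, hq⟩ := pv_len9 q.toList hl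
    obtain rfl : q = String.ofList [a, b, c, d, e, f, g, h', i] :=
      String.toList_inj.mp (by rw [hq]; simp)
    rw [pv_union_shape4]
    unfold pvDihedral
    refine congrArg PySem.List.dedup (pv_map_toList_inj _ _ ?_)
    simp [pvSliceStep, pvRev, pvFlat, pvRotCCW, pvTranspose, pvHMirror, pvRot180,
      PySem.Str.slice?, PySem.List.slice?, PySem.List.sliceIndices, List.range_succ,
      PySem.List.pyGetD,
      show PySem.List.pyRange 0 3 1 = [0, 1, 2] from by decide,
      PySem.List.slice, PySem.List.clampIdx]
  · by_cases h4 : PySem.Str.len q = 4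
    · simp only [if_neg h9, if_pos h4]
      have hl : q.toList.length = 4 := by
        have := PySem.Str.len_eq q
        rw [h4] at this; exact_mod_cast this.symm
      obtain ⟨a, b, c, d, hq⟩ := pv_len4 q.toList hl
      obtain rfl : q = String.ofList [a, b, c, d] :=
        String.toList_inj.mp (by rw [hq]; simp)
      rw [pv_union_shape4]
      unfold pvDihedral
      refine congrArg PySem.List.dedup (pv_map_toList_inj _ _ ?_)
      simp [pvSliceStep, pvRev, pvFlat, pvRotCCW, pvTranspose, pvHMirror, pvRot180,
        PySem.Str.slice?, PySem.List.slice?, PySem.List.sliceIndices, List.range_succ,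
        PySem.List.pyGetD,
        show PySem.List.pyRange 0 2 1 = [0, 1] from by decide,
        PySem.List.slice, PySem.List.clampIdx]
    · simp only [if_neg h9, if_neg h4]
      rw [pv_union_shape1]
      refine congrArg PySem.List.dedup (pv_map_toList_inj _ _ ?_)
      simp [pvRev, pvRevAlt, pvSliceStep]

-- ===== VERDICT (by name: the statement is the Claim_ definition above) =====
theorem parse_enhancement_rules_spec : Claim_equal_parse_enhancement_rules := by
  intro data _ _
  unfold Spec_parse_enhancement_rules parse_enhancement_rules parse_enhancement_rules_alt
  refine congrArg PySem.Dict.items ?_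
  refine PySem.List.foldl_congr_mem _ _ _ _ ?_
  intro d line _
  unfold pvApplyLine
  cases hsp : PySem.Str.split? line " => " with
  | none => rfl
  | some parts =>
    rcases parts with _ | ⟨x, _ | ⟨y, _ | ⟨z, t⟩⟩⟩ <;>
      simp [pv_variants_eq, PySem.List.pyGetD]
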